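-- pv_equiv track=rewrite | github.com/originalnicodr/LCC-CarpetaDigital | Segundo año/Complementos de Matemática I/practica3.py | check_is_hamiltonian_trail
-- ===== SOURCE A (Python) =====
-- def check_is_hamiltonian_trail(graph, path):
--     """Comprueba si una lista de aristas constituye un camino hamiltoniano
--     en un grafo.
--
--     Args:
--         graph (grafo): Grafo en formato de listas.
--                        Ej: (['a', 'b', 'c'], [('a', 'b'), ('b', 'c')])
--
--         path (lista de aristas): posible camino
--                                  Ej: [('a', 'b), ('b', 'c')]
--
--     Returns:
--         boolean: path es camino hamiltoniano en graph
--
--     Raises: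
--         TypeError: Cuando el tipo de un argumento es inválido
--     """
--     vertices,edges=graph#parseo
--     lastVertix= None
--     visitedVertices= set()
--     visitedEdges= set()
--
--     for edge in path:
--         if edge not in edges or edge in visitedEdges:   return False
--         if lastVertix!=None and lastVertix!=edge[0]: return False
--         if lastVertix==None: visitedVertices.add(edge[0])
--         if edge[1] in visitedVertices: return False
--         lastVertix=edge[1]
--         visitedVertices.add(edge[1])
--         visitedEdges.add(edge)
--     return visitedVertices==set(vertices)
-- ===== SOURCE B (Python) =====
-- def check_is_hamiltonian_trail(graph, path):
--     """Materialize-then-check re-implementation: build the implied vertex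
--     sequence and test independent conditions in separate passes."""
--     vertices, edges = graph
--     if not all(e in edges for e in path):
--         return False
--     if len(set(path)) != len(path):
--         return False
--     if not all(b[0] == a[1] for a, b in zip(path, path[1:])):
--         return False
--     seq = [path[0][0]] + [e[1] for e in path] if path else []
--     return len(set(seq)) == len(seq) and set(seq) == set(vertices)
-- ===== Notes on version B (the rewrite author's own statement) =====
-- stated objective: alternative
-- what changed: Replaces A's incremental state-machine scan (last vertex + visited sets, early return) with a materialize-then-check structure: B builds the implied vertex sequence and returns the conjunction of five independent passes (membership, edge distinctness, consecutive connection, vertex distinctness, vertex-set coverage).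
import Mathlib
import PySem

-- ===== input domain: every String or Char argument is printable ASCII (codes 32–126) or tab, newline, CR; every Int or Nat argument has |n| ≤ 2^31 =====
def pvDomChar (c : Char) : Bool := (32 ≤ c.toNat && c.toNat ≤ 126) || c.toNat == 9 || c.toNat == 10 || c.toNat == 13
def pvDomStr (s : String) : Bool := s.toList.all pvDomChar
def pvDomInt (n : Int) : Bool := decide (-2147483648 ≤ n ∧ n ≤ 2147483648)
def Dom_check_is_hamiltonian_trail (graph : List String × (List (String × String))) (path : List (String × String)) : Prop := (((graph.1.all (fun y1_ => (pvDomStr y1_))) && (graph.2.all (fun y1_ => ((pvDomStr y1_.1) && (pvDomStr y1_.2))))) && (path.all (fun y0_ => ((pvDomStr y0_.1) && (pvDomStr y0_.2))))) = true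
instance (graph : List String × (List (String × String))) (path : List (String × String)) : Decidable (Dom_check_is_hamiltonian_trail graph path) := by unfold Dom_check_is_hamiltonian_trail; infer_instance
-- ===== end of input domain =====

-- B replaces A's incremental state-machine scan with a materialize-then-check
-- multi-pass conjunction (alternative structure, same cost).

-- ===== PORT A =====
-- the for-loop of A, recursion over the remaining path with A's exact state
def chkTrailLoop (edges : List (String × String)) (vertices : List String)
    (lastVertix : Option String) (visitedVertices : PySem.Set String)
    (visitedEdges : PySem.Set (String × String)) : List (String × String) → Bool
  | [] => PySem.Set.equal visitedVertices (PySem.Set.ofList vertices)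
  | edge :: rest =>
    if !(edges.contains edge) || PySem.Set.contains visitedEdges edge then false
    else if lastVertix != none && lastVertix != some edge.1 then false
    else
      let visitedVertices := if lastVertix == none then PySem.Set.add visitedVertices edge.1 else visitedVertices
      if PySem.Set.contains visitedVertices edge.2 then false
      else chkTrailLoop edges vertices (some edge.2) (PySem.Set.add visitedVertices edge.2)
             (PySem.Set.add visitedEdges edge) rest

def check_is_hamiltonian_trail (graph : List String × (List (String × String))) (path : List (String × String)) : Bool :=
  chkTrailLoop graph.2 graph.1 none PySem.Set.empty PySem.Set.empty path

-- ===== PORT B =====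
def check_is_hamiltonian_trail_alt (graph : List String × (List (String × String))) (path : List (String × String)) : Bool :=
  let vertices := graph.1
  let edges := graph.2
  if !(path.all (fun e => edges.contains e)) then false
  else if !((PySem.Set.ofList path).length == path.length) then false
  else if !((path.zip path.tail).all (fun p => p.2.1 == p.1.2)) then false
  else
    let seq : List String := match path with
      | [] => []
      | e :: _ => e.1 :: path.map (fun x => x.2)
    ((PySem.Set.ofList seq).length == seq.length) &&
      PySem.Set.equal (PySem.Set.ofList seq) (PySem.Set.ofList vertices)

-- ===== PRECONDITION & SPEC =====
def Spec_check_is_hamiltonian_trail (graph : List String × (List (String × String))) (path : List (String × String)) (out : Bool) : Prop := out = check_is_hamiltonian_trail_alt graph path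
instance (graph : List String × (List (String × String))) (path : List (String × String)) (out : Bool) : Decidable (Spec_check_is_hamiltonian_trail graph path out) := by unfold Spec_check_is_hamiltonian_trail; infer_instance

-- ===== CLAIM (what is proved, stated in full; the proofs are below) =====
def Claim_equal_check_is_hamiltonian_trail : Prop := ∀ (graph : List String × (List (String × String))) (path : List (String × String)), Dom_check_is_hamiltonian_trail graph path → Spec_check_is_hamiltonian_trail graph path (check_is_hamiltonian_trail graph path)

-- ===== LEMMAS AND PROOFS =====

-- "every element of l is fresh w.r.t. the growing set s" (helper for the proofs)
def freshB {α : Type} [BEq α] (s : PySem.Set α) : List α → Bool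
  | [] => true
  | x :: l => !(PySem.Set.contains s x) && freshB (PySem.Set.add s x) l

-- "rest chains starting from last vertex v" (helper for the proofs)
def chainB (v : String) : List (String × String) → Bool
  | [] => true
  | e :: r => (e.1 == v) && chainB e.2 r

theorem chkTrailLoop_some (edges : List (String × String)) (vertices : List String) :
    ∀ (rest : List (String × String)) (v : String) (vv : PySem.Set String)
      (ve : PySem.Set (String × String)),
    chkTrailLoop edges vertices (some v) vv ve rest =
      (rest.all (fun e => edges.contains e) && freshB ve rest && chainB v rest &&
       freshB vv (rest.map (fun e => e.2)) &&
       PySem.Set.equal (rest.foldl (fun s e => PySem.Set.add s e.2) vv) (PySem.Set.ofList vertices)) := by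
  intro rest
  induction rest with
  | nil => intro v vv ve; simp [chkTrailLoop, freshB, chainB]
  | cons e r ih =>
    intro v vv ve
    simp only [chkTrailLoop, List.all_cons, freshB, chainB, List.map_cons, List.foldl_cons]
    by_cases hmem : e ∈ edges
    · by_cases hve : e ∈ ve
      · simp [hve]
      · by_cases hv : e.1 = v
        · by_cases hvv : e.2 ∈ vv
          · simp [hvv]
          · simp [hmem, hve, hv, hvv, ih, Bool.and_assoc, Bool.and_left_comm, Bool.and_comm]
        · simp [hmem, hve, hv, Ne.symm hv]
    · simp [hmem]

theorem update_len_le {α : Type} [BEq α] [LawfulBEq α] :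
    ∀ (l : List α) (s : PySem.Set α), (PySem.Set.update s l).length ≤ s.length + l.length := by
  intro l
  induction l with
  | nil => intro s; simp [PySem.Set.update_nil]
  | cons y l ihl =>
    intro s
    rw [PySem.Set.update_cons]
    have h1 : (PySem.Set.add s y).length ≤ s.length + 1 := by
      rw [PySem.Set.add_eq_ite]
      split <;> simp
    calc (PySem.Set.update (PySem.Set.add s y) l).length
        ≤ (PySem.Set.add s y).length + l.length := ihl _
      _ ≤ s.length + (y :: l).length := by simp; omega

theorem freshB_eq_len {α : Type} [BEq α] [LawfulBEq α] :
    ∀ (l : List α) (s : PySem.Set α),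
    freshB s l = ((PySem.Set.update s l).length == s.length + l.length) := by
  intro l
  induction l with
  | nil => intro s; simp [freshB, PySem.Set.update_nil]
  | cons x l ih =>
    intro s
    simp only [freshB, PySem.Set.update_cons]
    by_cases hx : x ∈ s
    · have hadd : PySem.Set.add s x = s := PySem.Set.add_of_mem hx
      have hle : (PySem.Set.update s l).length ≤ s.length + l.length := update_len_le l s
      have hfalse : ((PySem.Set.update s l).length == s.length + (x :: l).length) = false := by
        simp only [List.length_cons, beq_eq_false_iff_ne, ne_eq]
        omega
      rw [hadd]
      simp only [List.length_cons] at hfalse ⊢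
      simp [hx, hfalse]
    · have hadd : PySem.Set.add s x = s ++ [x] := PySem.Set.add_of_not_mem hx
      rw [hadd, ih]
      simp only [List.length_append, List.length_cons, List.length_nil]
      have harith : s.length + 1 + l.length = s.length + (l.length + 1) := by omega
      simp [hx, harith]

theorem zip_chain :
    ∀ (r : List (String × String)) (e : String × String),
    ((e :: r).zip r).all (fun p => p.2.1 == p.1.2) = chainB e.2 r := by
  intro r
  induction r with
  | nil => intro e; simp [chainB]
  | cons a r ih => intro e; simp [chainB, ih a]

theorem if_not_and (c x : Bool) : (if (!c) = true then false else x) = (c && x) := by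
  cases c <;> simp

theorem ofList_len_eq_freshB {α : Type} [BEq α] [LawfulBEq α] (l : List α) :
    ((PySem.Set.ofList l).length == l.length) = freshB PySem.Set.empty l := by
  rw [freshB_eq_len]
  simp [PySem.Set.update_nil_left]

theorem ofList_seq (e : String × String) (r : List (String × String)) :
    PySem.Set.ofList (e.1 :: e.2 :: r.map (fun x => x.2)) =
      r.foldl (fun s x => PySem.Set.add s x.2)
        (PySem.Set.add (PySem.Set.add PySem.Set.empty e.1) e.2) := by
  rw [PySem.Set.ofList_eq_foldl]
  simp [List.foldl_map, PySem.Set.empty]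

-- ===== VERDICT (by name: the statement is the Claim_ definition above) =====
theorem check_is_hamiltonian_trail_spec : Claim_equal_check_is_hamiltonian_trail := by
  intro graph path _
  unfold Spec_check_is_hamiltonian_trail
  obtain ⟨vertices, edges⟩ := graph
  cases path with
  | nil =>
    simp [check_is_hamiltonian_trail, check_is_hamiltonian_trail_alt, chkTrailLoop,
      PySem.Set.empty, PySem.Set.ofList]
  | cons e r =>
    show chkTrailLoop edges vertices none PySem.Set.empty PySem.Set.empty (e :: r) = _
    simp only [check_is_hamiltonian_trail_alt, if_not_and]
    simp only [List.tail_cons]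
    rw [zip_chain]
    simp only [ofList_len_eq_freshB, List.map_cons]
    simp only [chkTrailLoop]
    by_cases hmem : e ∈ edges
    · by_cases h21 : e.2 = e.1
      · simp [hmem, h21, freshB, PySem.Set.empty]
      · simp [hmem, h21, freshB, PySem.Set.empty, chkTrailLoop_some, ofList_seq,
          Bool.and_assoc, Bool.and_left_comm, Bool.and_comm]
    · simp [hmem, freshB, PySem.Set.empty]
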